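-- pv_equiv track=rewrite | github.com/ShrihanSolo/projects | .ipynb_checkpoints/CnBexp-checkpoint.py | checkCows
-- ===== SOURCE A (Python) =====
-- def checkCows(code, guess):
--     """Checks number of Cows for a guess.
--
--     >>> checkCows([1,2,3,4], [4,3,2,1])
--     4
--     >>> checkCows([1,3,1,3], [3,1,3,1])
--     4
--     >>> checkCows([1,2,3,4], [1,3,2,4])
--     4
--     >>> checkCows([0,1,3,4], [2,1,4,5])
--     2
--     >>> checkCows([2,1,1,7], [1,5,6,7])
--     2
--     >>> checkCows([2,1,2,3], [1,1,2,3])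
--     3
--     >>> checkCows([1,1,3,3], [3,3,2,3])
--     2
--     >>> checkCows([1,1,1,1], [2,3,4,5])
--     0
--     """
--
--     cow = 0
--     checklist = []
--     for i in guess:
--         check = (i not in checklist)
--         num_in_code = code.count(i)
--         num_in_guess = guess.count(i)
--         if (num_in_code == num_in_guess) and check:
--             cow = cow + num_in_code
--             checklist.append(i)
--         elif (num_in_code > num_in_guess) and check:
--             cow = cow + num_in_guess
--             checklist.append(i)
--         elif (num_in_code < num_in_guess) and check:
--             cow = cow + num_in_code
--             checklist.append(i)
--     return cow
-- ===== SOURCE B (Python) =====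
-- def checkCows(code, guess):
--     """Count cows: sum over values of min(occurrences in code, occurrences in guess)."""
--     remaining = {}
--     for c in code:
--         remaining[c] = remaining.get(c, 0) + 1
--     cows = 0
--     for g in guess:
--         if remaining.get(g, 0) > 0:
--             cows += 1
--             remaining[g] = remaining[g] - 1
--     return cows
-- ===== Notes on version B (the rewrite author's own statement) =====
-- stated objective: faster
-- what changed: Replaces the per-element count scans over both whole lists plus a checklist membership scan with a single hash counter of code that is decremented in one pass over guess.
import Mathlib
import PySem

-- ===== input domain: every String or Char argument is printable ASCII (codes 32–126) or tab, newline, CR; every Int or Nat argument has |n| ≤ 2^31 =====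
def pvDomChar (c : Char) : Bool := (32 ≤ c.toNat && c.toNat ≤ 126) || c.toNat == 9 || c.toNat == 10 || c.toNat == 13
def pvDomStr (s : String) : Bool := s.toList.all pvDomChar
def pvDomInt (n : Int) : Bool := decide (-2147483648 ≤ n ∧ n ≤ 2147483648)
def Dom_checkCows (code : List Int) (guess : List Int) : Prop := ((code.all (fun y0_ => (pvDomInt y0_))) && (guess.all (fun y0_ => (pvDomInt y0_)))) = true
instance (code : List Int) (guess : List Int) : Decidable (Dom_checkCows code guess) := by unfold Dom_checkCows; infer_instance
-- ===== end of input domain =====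

-- B replaces A's per-element whole-list count scans and checklist membership scans with a
-- single hash counter of `code` decremented in one pass over `guess` (asymptotically faster).


-- ===== PORT A =====
def checkCows (code : List Int) (guess : List Int) : Int :=
  (guess.foldl (fun (p : Int × List Int) i =>
      let check : Bool := !(p.2.contains i)
      let numInCode := PySem.List.count code i
      let numInGuess := PySem.List.count guess i
      if (numInCode == numInGuess) && check then (p.1 + numInCode, p.2 ++ [i])
      else if (numInCode > numInGuess) && check then (p.1 + numInGuess, p.2 ++ [i])
      else if (numInCode < numInGuess) && check then (p.1 + numInCode, p.2 ++ [i])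
      else p) ((0 : Int), ([] : List Int))).1

-- ===== PORT B =====
def checkCows_alt (code : List Int) (guess : List Int) : Int :=
  let remaining := code.foldl (fun (d : PySem.Dict Int Int) c => d.insert c (d.getD c 0 + 1)) PySem.Dict.empty
  (guess.foldl (fun (p : PySem.Dict Int Int × Int) g =>
      if p.1.getD g 0 > 0 then (p.1.insert g (p.1.getD g 0 - 1), p.2 + 1)
      else p) (remaining, (0 : Int))).2

-- ===== PRECONDITION & SPEC =====
def Spec_checkCows (code : List Int) (guess : List Int) (out : Int) : Prop := out = checkCows_alt code guess
instance (code : List Int) (guess : List Int) (out : Int) : Decidable (Spec_checkCows code guess out) := by unfold Spec_checkCows; infer_instance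

-- ===== CLAIM (what is proved, stated in full; the proofs are below) =====
def Claim_equal_checkCows : Prop := ∀ (code : List Int) (guess : List Int), Dom_checkCows code guess → Spec_checkCows code guess (checkCows code guess)

-- ===== LEMMAS AND PROOFS =====

-- sum over the values of `insert i s` not yet in checklist `cl`, pulling out the i-term
theorem pv_sum_filter_step (s : Finset Int) (cl : List Int) (i : Int) (f : Int → Int) (hi : i ∉ cl) :
    ∑ v ∈ (insert i s).filter (fun v => v ∉ cl), f v
      = f i + ∑ v ∈ s.filter (fun v => v ∉ cl ++ [i]), f v := by
  have h1 : (insert i s).filter (fun v => v ∉ cl) = insert i (s.filter (fun v => v ∉ cl)) := by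
    rw [Finset.filter_insert, if_pos hi]
  have h2 : s.filter (fun v => v ∉ cl ++ [i]) = (s.filter (fun v => v ∉ cl)).erase i := by
    ext v
    simp [List.mem_append, and_comm, and_left_comm, not_or]
  rw [h1, h2]
  by_cases hm : i ∈ s.filter (fun v => v ∉ cl)
  · rw [Finset.insert_eq_self.2 hm, ← Finset.add_sum_erase _ f hm]
  · rw [Finset.sum_insert hm, Finset.erase_eq_of_notMem hm]

-- invariant of A's loop
theorem pv_A_loop (code guess : List Int) (rest : List Int) (cl : List Int) (cow : Int) :
    (rest.foldl (fun (p : Int × List Int) i =>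
      let check : Bool := !(p.2.contains i)
      let numInCode := PySem.List.count code i
      let numInGuess := PySem.List.count guess i
      if (numInCode == numInGuess) && check then (p.1 + numInCode, p.2 ++ [i])
      else if (numInCode > numInGuess) && check then (p.1 + numInGuess, p.2 ++ [i])
      else if (numInCode < numInGuess) && check then (p.1 + numInCode, p.2 ++ [i])
      else p) (cow, cl)).1
    = cow + ∑ v ∈ rest.toFinset.filter (fun v => v ∉ cl),
        min ((code.count v : Int)) ((guess.count v : Int)) := by
  induction rest generalizing cl cow with
  | nil => simp
  | cons i rest ih =>
    by_cases hi : i ∈ cl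
    · have hc : (!(cl.contains i)) = false := by simp [hi]
      simp only [List.foldl_cons, hc, Bool.and_false, Bool.false_eq_true]
      rw [if_neg (by simp), if_neg (by simp), if_neg (by simp)]
      rw [ih cl cow, List.toFinset_cons, Finset.filter_insert, if_neg (by simp [hi])]
    · have hc : (!(cl.contains i)) = true := by simp [hi]
      have hce := PySem.List.count_eq code i
      have hge := PySem.List.count_eq guess i
      simp only [List.foldl_cons, hc, Bool.and_true]
      rcases lt_trichotomy (PySem.List.count code i) (PySem.List.count guess i) with h | h | h
      · rw [if_neg (by simp only [beq_iff_eq]; exact h.ne),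
            if_neg (by simp only [decide_eq_true_eq]; exact fun hh => lt_asymm h hh),
            if_pos (by simp only [decide_eq_true_eq]; exact h)]
        rw [hce, hge] at h
        rw [ih (cl ++ [i]) _, List.toFinset_cons,
          pv_sum_filter_step rest.toFinset cl i _ hi, hce]
        omega
      · rw [if_pos (by simp only [beq_iff_eq]; exact h)]
        rw [hce, hge] at h
        rw [ih (cl ++ [i]) _, List.toFinset_cons,
          pv_sum_filter_step rest.toFinset cl i _ hi, hce]
        omega
      · rw [if_neg (by simp only [beq_iff_eq]; exact h.ne'),
            if_pos (by simp only [decide_eq_true_eq]; exact h)]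
        rw [hce, hge] at h
        rw [ih (cl ++ [i]) _, List.toFinset_cons,
          pv_sum_filter_step rest.toFinset cl i _ hi, hge]
        omega

-- invariant of B's loop
theorem pv_B_loop (rest : List Int) (d : PySem.Dict Int Int) (cows : Int)
    (h : ∀ v, 0 ≤ d.getD v 0) :
    (rest.foldl (fun (p : PySem.Dict Int Int × Int) g =>
      if p.1.getD g 0 > 0 then (p.1.insert g (p.1.getD g 0 - 1), p.2 + 1)
      else p) (d, cows)).2
    = cows + ∑ v ∈ rest.toFinset, min (d.getD v 0) ((rest.count v : Int)) := by
  induction rest generalizing d cows with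
  | nil => simp
  | cons g rest ih =>
    simp only [List.foldl_cons]
    by_cases hg : d.getD g 0 > 0
    · rw [if_pos hg]
      have hnn : ∀ v, 0 ≤ (d.insert g (d.getD g 0 - 1)).getD v 0 := by
        intro v
        rw [PySem.Dict.getD_insert]
        split_ifs with hv
        · omega
        · exact h v
      rw [ih _ _ hnn, List.toFinset_cons]
      by_cases hm : g ∈ rest.toFinset
      · rw [Finset.insert_eq_self.2 hm,
          ← Finset.add_sum_erase _ _ hm, ← Finset.add_sum_erase _ _ hm]
        have hterm : min (d.getD g 0) (((g :: rest).count g : Int))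
            = 1 + min ((d.insert g (d.getD g 0 - 1)).getD g 0) ((rest.count g : Int)) := by
          rw [PySem.Dict.getD_insert, if_pos rfl, List.count_cons_self]
          push_cast; omega
        have hrest : ∑ v ∈ rest.toFinset.erase g, min (d.getD v 0) (((g :: rest).count v : Int))
            = ∑ v ∈ rest.toFinset.erase g, min ((d.insert g (d.getD g 0 - 1)).getD v 0) ((rest.count v : Int)) := by
          refine Finset.sum_congr rfl (fun v hv => ?_)
          have hne : v ≠ g := Finset.ne_of_mem_erase hv
          rw [PySem.Dict.getD_insert, if_neg hne]
          simp [List.count_cons, Ne.symm hne]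
        rw [hterm, hrest]; ring
      · have hg0 : rest.count g = 0 := by
          simp only [List.mem_toFinset] at hm
          exact List.count_eq_zero.2 hm
        rw [Finset.sum_insert hm]
        have hterm : min (d.getD g 0) (((g :: rest).count g : Int)) = 1 := by
          rw [List.count_cons_self, hg0]
          push_cast; omega
        have hrest : ∑ v ∈ rest.toFinset, min (d.getD v 0) (((g :: rest).count v : Int))
            = ∑ v ∈ rest.toFinset, min ((d.insert g (d.getD g 0 - 1)).getD v 0) ((rest.count v : Int)) := by
          refine Finset.sum_congr rfl (fun v hv => ?_)
          have hne : v ≠ g := by rintro rfl; exact hm hv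
          rw [PySem.Dict.getD_insert, if_neg hne]
          simp [List.count_cons, Ne.symm hne]
        rw [hterm, hrest]; ring
    · rw [if_neg hg]
      have hz : d.getD g 0 = 0 := le_antisymm (not_lt.1 hg) (h g)
      rw [ih _ _ h, List.toFinset_cons]
      by_cases hm : g ∈ rest.toFinset
      · rw [Finset.insert_eq_self.2 hm]
        refine congrArg (cows + ·) (Finset.sum_congr rfl (fun v hv => ?_))
        by_cases hv' : v = g
        · subst hv'; rw [hz]; omega
        · simp [List.count_cons, Ne.symm hv']
      · rw [Finset.sum_insert hm]
        have : min (d.getD g 0) (((g :: rest).count g : Int)) = 0 := by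
          rw [hz]; omega
        rw [this, zero_add]
        refine congrArg (cows + ·) (Finset.sum_congr rfl (fun v hv => ?_))
        have hne : v ≠ g := by rintro rfl; exact hm hv
        simp [List.count_cons, Ne.symm hne]

-- ===== VERDICT (by name: the statement is the Claim_ definition above) =====
theorem checkCows_spec : Claim_equal_checkCows := by
  intro code guess _
  unfold Spec_checkCows checkCows checkCows_alt
  rw [pv_A_loop code guess guess [] 0]
  rw [pv_B_loop guess _ 0 (by
    intro v
    rw [PySem.Dict.getD_foldl_insert_add_one]
    simp)]
  rw [Finset.filter_true_of_mem (fun v _ => by simp)]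
  refine congrArg (0 + ·) (Finset.sum_congr rfl (fun v _ => ?_))
  rw [PySem.Dict.getD_foldl_insert_add_one]
  simp
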